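-- pv_equiv track=rewrite | github.com/FarhanIVohra/DocuSearch | backend/index/search.py | _and_intersect
-- ===== SOURCE A (Python) =====
-- from typing import Dict, List, Tuple
--
-- def _and_intersect(posting_lists: List[List[Dict[str, int]]]) -> List[int]:
--     """Return sorted intersection of doc_ids present in all posting lists."""
--     if not posting_lists:
--         return []
--     posting_lists = sorted(posting_lists, key=len)
--     base = posting_lists[0]
--     docs = [e["doc_id"] for e in base]
--     common = set(docs)
--     for plist in posting_lists[1:]:
--         dset = {e["doc_id"] for e in plist}
--         common &= dset
--         if not common:
--             return []
--     return sorted(common)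
-- ===== SOURCE B (Python) =====
-- def _and_intersect(posting_lists):
--     """Return sorted intersection of doc_ids present in all posting lists."""
--     if not posting_lists:
--         return []
--     plists = sorted(posting_lists, key=len)
--     counts = {e["doc_id"]: 1 for e in plists[0]}
--     for i, plist in enumerate(plists[1:], start=2):
--         for d in {e["doc_id"] for e in plist}:
--             if d in counts:
--                 counts[d] += 1
--         if i not in counts.values():
--             return []
--     return sorted(d for d, c in counts.items() if c == len(plists))
-- ===== Notes on version B (the rewrite author's own statement) =====
-- stated objective: alternative
-- what changed: Replaces the running pairwise set-intersection with a per-doc_id frequency count (dict of counts over the shortest list's ids, threshold = number of lists), keeping the same length-sorted scan order and the same stop-when-no-survivor early exit.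
import Mathlib
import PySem

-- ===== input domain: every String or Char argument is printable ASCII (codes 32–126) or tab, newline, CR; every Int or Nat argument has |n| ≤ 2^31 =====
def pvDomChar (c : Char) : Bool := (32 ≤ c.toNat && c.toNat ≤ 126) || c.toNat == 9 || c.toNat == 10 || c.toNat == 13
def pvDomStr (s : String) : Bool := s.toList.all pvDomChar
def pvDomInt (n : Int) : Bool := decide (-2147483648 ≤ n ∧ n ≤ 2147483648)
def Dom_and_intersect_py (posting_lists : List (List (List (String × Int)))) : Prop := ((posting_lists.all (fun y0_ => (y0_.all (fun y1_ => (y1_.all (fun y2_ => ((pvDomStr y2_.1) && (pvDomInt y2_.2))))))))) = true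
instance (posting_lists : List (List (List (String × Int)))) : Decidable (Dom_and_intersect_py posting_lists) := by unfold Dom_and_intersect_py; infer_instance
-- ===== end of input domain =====

-- B replaces the running pairwise set-intersection with a per-doc_id frequency count and threshold
-- filter, keeping the same length-sorted scan order and early exit (objective: alternative).

-- ===== PORT A =====
-- e["doc_id"] (total form; inside Pre_ every entry read by either Python carries the key, so the
-- default is never read on an admitted input)
def pvDocId (e : List (String × Int)) : Int := (PySem.Dict.ofList e).getD "doc_id" 0

-- the 'for plist in posting_lists[1:]' loop of A: intersect, early-exit early when empty
def pvAloop (common : PySem.Set Int) : List (List (List (String × Int))) → List Int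
  | [] => PySem.List.sorted common (fun x => x) false
  | pl :: rest =>
    let dset : PySem.Set Int := PySem.Set.ofList (pl.map pvDocId)
    let c := PySem.Set.inter common dset
    if c = [] then [] else pvAloop c rest

def and_intersect_py (posting_lists : List (List (List (String × Int)))) : List Int :=
  if posting_lists = [] then []
  else
    let s := PySem.List.sorted posting_lists (fun pl => pl.length) false
    let base := s.headI
    let docs := base.map pvDocId
    pvAloop (PySem.Set.ofList docs) s.tail

-- ===== PORT B =====
-- the 'for i, plist in enumerate(plists[1:], start=2)' loop of B: bump the count of each id seen,
-- exit early when no id has been seen in all rounds so far; at the end keep the ids whose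
-- count equals the number of lists
def pvBloop (n : Int) (counts : PySem.Dict Int Int) (r : Int) :
    List (List (List (String × Int))) → List Int
  | [] =>
    PySem.List.sorted ((counts.items.filter (fun kv => kv.2 = n)).map (fun kv => kv.1))
      (fun x => x) false
  | pl :: rest =>
    let counts' := (PySem.Set.ofList (pl.map pvDocId)).foldl
      (fun c d => if c.contains d then c.modify d 0 (fun v => v + 1) else c) counts
    if counts'.values.contains (r + 1) then pvBloop n counts' (r + 1) rest else []

def and_intersect_py_alt (posting_lists : List (List (List (String × Int)))) : List Int :=
  if posting_lists = [] then []
  else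
    let s := PySem.List.sorted posting_lists (fun pl => pl.length) false
    let counts := s.headI.foldl (fun c e => c.insert (pvDocId e) 1) PySem.Dict.empty
    pvBloop (posting_lists.length : Int) counts 1 s.tail

-- ===== PRECONDITION & SPEC =====
def pvHasDoc (e : List (String × Int)) : Bool := e.any (fun p => p.1 == "doc_id")
def pvWF (pl : List (List (String × Int))) : Bool := pl.all pvHasDoc
-- the maximal keyless-free prefix of the length-sorted order both programs scan in
def pvPrefix (posting_lists : List (List (List (String × Int)))) : List (List (List (String × Int))) :=
  (PySem.List.sorted posting_lists (fun pl => pl.length) false).takeWhile pvWF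

-- Pre_ admits exactly the inputs on which Python A returns: either every entry carries the key
-- "doc_id", or, in the length-sorted scan order both programs use, the keyless-free prefix has at
-- least 2 lists and its doc-id sets already have empty intersection, so both programs stop early
-- before any keyless entry is read; outside Pre_ both Pythons raise KeyError at the same entry.
def Pre_and_intersect_py (posting_lists : List (List (List (String × Int)))) : Prop :=
  (posting_lists.all pvWF) = true ∨
  (2 ≤ (pvPrefix posting_lists).length ∧
    ((pvPrefix posting_lists).headI.map pvDocId).all
      (fun d => !((pvPrefix posting_lists).all
        (fun pl => (pl.map pvDocId).contains d))) = true)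
instance (posting_lists : List (List (List (String × Int)))) : Decidable (Pre_and_intersect_py posting_lists) := by unfold Pre_and_intersect_py; infer_instance

def pvWitness_and_intersect_py : (List (List (List (String × Int)))) :=
  [[[("doc_id", 1)], [("doc_id", 2)]], [[("doc_id", 2)], [("doc_id", 3)]]]

def Spec_and_intersect_py (posting_lists : List (List (List (String × Int)))) (out : List Int) : Prop := out = and_intersect_py_alt posting_lists
instance (posting_lists : List (List (List (String × Int)))) (out : List Int) : Decidable (Spec_and_intersect_py posting_lists out) := by unfold Spec_and_intersect_py; infer_instance

-- ===== CLAIM (what is proved, stated in full; the proofs are below) =====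
def Claim_equal_and_intersect_py : Prop := ∀ (posting_lists : List (List (List (String × Int)))), Dom_and_intersect_py posting_lists → Pre_and_intersect_py posting_lists → Spec_and_intersect_py posting_lists (and_intersect_py posting_lists)

-- ===== LEMMAS AND PROOFS =====

-- building {e["doc_id"]: 1 for e in base}: lookups
theorem pv_insert1_getD (l : List (List (String × Int))) (c : PySem.Dict Int Int) (x : Int) :
    (l.foldl (fun c e => c.insert (pvDocId e) 1) c).getD x 0
      = if x ∈ l.map pvDocId then 1 else c.getD x 0 := by
  induction l generalizing c with
  | nil => simp
  | cons e l ih =>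
    rw [List.foldl_cons, ih]
    by_cases hm : x ∈ l.map pvDocId
    · simp [hm]
    · by_cases he : x = pvDocId e
      · simp [hm, he]
      · simp [hm, PySem.Dict.getD_insert_of_ne, he]

-- the conditional count-bump loop never changes the key set
theorem pv_stepfold_keys (l : List Int) (c : PySem.Dict Int Int) :
    (l.foldl (fun c d => if c.contains d then c.modify d 0 (fun v => v + 1) else c) c).keys
      = c.keys := by
  induction l generalizing c with
  | nil => rfl
  | cons d l ih =>
    rw [List.foldl_cons]
    by_cases hc : c.contains d = true
    · rw [if_pos hc, ih, PySem.Dict.keys_modify]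
      simp [PySem.Dict.keys_insert_of_contains, hc]
    · rw [if_neg hc, ih]

-- …and bumps each present key that the scanned (duplicate-free) list mentions by one
theorem pv_stepfold_getD (l : List Int) (c : PySem.Dict Int Int) (x : Int) (hl : l.Nodup) :
    (l.foldl (fun c d => if c.contains d then c.modify d 0 (fun v => v + 1) else c) c).getD x 0
      = c.getD x 0 + (if x ∈ l ∧ c.contains x = true then 1 else 0) := by
  induction l generalizing c with
  | nil => simp
  | cons d l ih =>
    obtain ⟨hdl, hl'⟩ := List.nodup_cons.mp hl
    rw [List.foldl_cons]
    by_cases hc : c.contains d = true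
    · rw [if_pos hc, ih _ hl']
      have hcontains : (c.modify d 0 (fun v => v + 1)).contains x = c.contains x := by
        rw [PySem.Dict.contains_modify]
        by_cases hy : x = d
        · subst hy; simp [hc]
        · simp [hy]
      rw [hcontains, PySem.Dict.getD_modify]
      by_cases hx : x = d
      · rw [if_pos hx]
        have h1 : ¬(x ∈ l ∧ c.contains x = true) := fun hh => (hx ▸ hdl) hh.1
        have h2 : x ∈ d :: l ∧ c.contains x = true := ⟨by simp [hx], hx ▸ hc⟩
        rw [if_neg h1, if_pos h2, hx]
        ring
      · rw [if_neg hx]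
        have hmem : (x ∈ d :: l ∧ c.contains x = true) ↔ (x ∈ l ∧ c.contains x = true) := by
          simp [List.mem_cons, hx]
        rw [if_congr hmem rfl rfl]
    · rw [if_neg hc, ih _ hl']
      by_cases hcx : c.contains x = true
      · have hx : ¬ x = d := fun he => hc (he ▸ hcx)
        have hmem : (x ∈ d :: l ∧ c.contains x = true) ↔ (x ∈ l ∧ c.contains x = true) := by
          simp [List.mem_cons, hx]
        rw [if_congr hmem rfl rfl]
      · have h1 : ¬(x ∈ l ∧ c.contains x = true) := fun hh => hcx hh.2
        have h2 : ¬(x ∈ d :: l ∧ c.contains x = true) := fun hh => hcx hh.2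
        rw [if_neg h1, if_neg h2]

-- 'v in d.values()' for a dict with unique keys
theorem pv_values_contains (d : PySem.Dict Int Int) (hnd : d.keys.Nodup) (v : Int) :
    d.values.contains v = true ↔ ∃ k ∈ d.keys, d.getD k 0 = v := by
  rw [PySem.Dict.values_eq_map_keys d hnd 0]
  simp [List.mem_map]

-- the final comprehension 'd for d, c in counts.items() if c == n' keyed on a nodup-key dict
theorem pv_filter_items (d : PySem.Dict Int Int) (hnd : d.keys.Nodup) (n : Int) :
    (d.items.filter (fun kv => kv.2 = n)).map (fun kv => kv.1)
      = d.keys.filter (fun k => decide (d.getD k 0 = n)) := by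
  rw [PySem.Dict.items_eq_map_keys d hnd 0, List.filter_map, List.map_map]
  simp [Function.comp_def]

-- the two loops agree whenever the counts dict reflects the surviving-id set 'common':
-- the keys cover 'common', each key's count is at most r, and a key's count equals r
-- exactly when the id is still in 'common'
theorem pv_loop_eq (rest : List (List (List (String × Int)))) :
    ∀ (common : PySem.Set Int) (counts : PySem.Dict Int Int) (r n : Int),
    common.Nodup → counts.keys.Nodup →
    (∀ d, d ∈ common → d ∈ counts.keys) →
    (∀ d ∈ counts.keys, counts.getD d 0 ≤ r) →
    (∀ d ∈ counts.keys, (counts.getD d 0 = r ↔ d ∈ common)) →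
    r + rest.length = n →
    pvAloop common rest = pvBloop n counts r rest := by
  induction rest with
  | nil =>
    intro common counts r n hnd hknd hsub _ hiff hn
    have hrn : r = n := by simpa using hn
    subst hrn
    simp only [pvAloop, pvBloop]
    rw [pv_filter_items counts hknd]
    rw [PySem.List.sorted_id_eq_sorted_id_iff_perm]
    refine (List.perm_ext_iff_of_nodup hnd (hknd.filter _)).mpr ?_
    intro d
    rw [List.mem_filter]
    constructor
    · intro hd
      exact ⟨hsub d hd, by simpa using (hiff d (hsub d hd)).mpr hd⟩
    · rintro ⟨hk, hv⟩
      exact (hiff d hk).mp (by simpa using hv)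
  | cons pl rest ih =>
    intro common counts r n hnd hknd hsub hle hiff hn
    simp only [pvAloop, pvBloop]
    set dset : PySem.Set Int := PySem.Set.ofList (pl.map pvDocId) with hdset
    set common' := PySem.Set.inter common dset with hcommon'
    set counts' := dset.foldl
      (fun c d => if c.contains d then c.modify d 0 (fun v => v + 1) else c) counts with hcounts'
    have hkeys' : counts'.keys = counts.keys := pv_stepfold_keys _ _
    have hgetD' : ∀ x ∈ counts.keys, counts'.getD x 0
        = counts.getD x 0 + (if x ∈ pl.map pvDocId then 1 else 0) := by
      intro x hx
      rw [hcounts', pv_stepfold_getD _ _ _ (PySem.Set.nodup_ofList _)]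
      have hcx : counts.contains x = true := (PySem.Dict.contains_iff_mem_keys _ _).mpr hx
      by_cases hm : x ∈ pl.map pvDocId
      · rw [if_pos ⟨(PySem.Set.mem_ofList _ _).mpr hm, hcx⟩, if_pos hm]
      · rw [if_neg (fun hh => hm ((PySem.Set.mem_ofList _ _).mp hh.1)), if_neg hm]
    have hiff' : ∀ d ∈ counts.keys, (counts'.getD d 0 = r + 1 ↔ d ∈ common') := by
      intro d hd
      rw [hgetD' d hd, hcommon', PySem.Set.mem_inter, hdset, PySem.Set.mem_ofList]
      by_cases hm : d ∈ pl.map pvDocId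
      · rw [if_pos hm]
        constructor
        · intro he; exact ⟨(hiff d hd).mp (by omega), hm⟩
        · rintro ⟨hcm, -⟩; have := (hiff d hd).mpr hcm; omega
      · rw [if_neg hm]
        have := hle d hd
        constructor
        · intro he; omega
        · rintro ⟨-, hmm⟩; exact absurd hmm hm
    have hvc : counts'.values.contains (r + 1) = true ↔ common' ≠ [] := by
      rw [pv_values_contains counts' (hkeys' ▸ hknd) (r + 1), hkeys']
      constructor
      · rintro ⟨k, hk, hv⟩
        intro hemp
        have : k ∈ common' := (hiff' k hk).mp hv
        rw [hemp] at this; simp at this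
      · intro hne
        obtain ⟨k, hk⟩ := List.exists_mem_of_ne_nil _ hne
        have hkk : k ∈ counts.keys :=
          hsub k ((PySem.Set.mem_inter _ _ _).mp (hcommon' ▸ hk)).1
        exact ⟨k, hkk, (hiff' k hkk).mpr hk⟩
    by_cases hemp : common' = []
    · rw [if_pos hemp]
      have hfalse : counts'.values.contains (r + 1) = false := by
        cases hb : counts'.values.contains (r + 1)
        · rfl
        · exact absurd hemp (hvc.mp hb)
      rw [hfalse]
      simp
    · rw [if_neg hemp, if_pos (hvc.mpr hemp)]
      refine ih common' counts' (r + 1) n (PySem.Set.nodup_inter _ _ hnd)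
        (hkeys' ▸ hknd) ?_ ?_ ?_ ?_
      · intro d hd
        rw [hkeys']
        exact hsub d ((PySem.Set.mem_inter _ _ _).mp (hcommon' ▸ hd)).1
      · intro d hd
        rw [hkeys'] at hd
        rw [hgetD' d hd]
        have := hle d hd
        split_ifs <;> omega
      · intro d hd
        rw [hkeys'] at hd
        exact hiff' d hd
      · simp only [List.length_cons] at hn
        push_cast at hn ⊢
        omega

-- the initial state of both loops is related as pv_loop_eq requires
theorem pv_init (hd : List (List (String × Int))) :
    (hd.foldl (fun c e => c.insert (pvDocId e) 1) (PySem.Dict.empty : PySem.Dict Int Int)).keys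
        = PySem.Set.ofList (hd.map pvDocId)
    ∧ (hd.foldl (fun c e => c.insert (pvDocId e) 1) (PySem.Dict.empty : PySem.Dict Int Int)).keys.Nodup
    ∧ ∀ x : Int, (hd.foldl (fun c e => c.insert (pvDocId e) 1) (PySem.Dict.empty : PySem.Dict Int Int)).getD x 0
        = if x ∈ hd.map pvDocId then 1 else 0 := by
  refine ⟨?_, ?_, ?_⟩
  · have h := PySem.Dict.keys_foldl_insert_key (l := hd) (key := pvDocId)
      (f := fun _ _ => (1 : Int)) (d := PySem.Dict.empty)
    simpa [PySem.Set.update_nil_left] using h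
  · exact PySem.Dict.nodup_keys_foldl_insert_key hd pvDocId _ _ PySem.Dict.nodup_keys_empty
  · intro x
    rw [pv_insert1_getD]
    simp

-- ===== VERDICT (by name: the statement is the Claim_ definition above) =====
theorem and_intersect_py_spec : Claim_equal_and_intersect_py := by
  intro pls _ _
  unfold Spec_and_intersect_py
  by_cases h : pls = []
  · subst h; rfl
  · obtain ⟨hd, tl, hs⟩ : ∃ hd tl,
        PySem.List.sorted pls (fun pl => pl.length) false = hd :: tl := by
      have hne : PySem.List.sorted pls (fun pl => pl.length) false ≠ [] := by
        rw [Ne, PySem.List.sorted_eq_nil_iff]; exact h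
      obtain ⟨hd, tl, htl⟩ := List.exists_cons_of_ne_nil hne
      exact ⟨hd, tl, htl⟩
    simp only [and_intersect_py, and_intersect_py_alt, if_neg h, hs, List.headI_cons,
      List.tail_cons]
    obtain ⟨hkeys0, hknd0, hgetD0⟩ := pv_init hd
    refine pv_loop_eq tl (PySem.Set.ofList (hd.map pvDocId)) _ 1 (pls.length : Int)
      (PySem.Set.nodup_ofList _) hknd0 ?_ ?_ ?_ ?_
    · intro d hdm
      rw [hkeys0]
      exact hdm
    · intro d _
      rw [hgetD0 d]
      split_ifs <;> omega
    · intro d hdm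
      rw [hkeys0] at hdm
      have hm : d ∈ hd.map pvDocId := (PySem.Set.mem_ofList _ _).mp hdm
      rw [hgetD0 d, if_pos hm]
      simp [hdm]
    · have hlen : pls.length = tl.length + 1 := by
        have hh := PySem.List.length_sorted (xs := pls) (key := fun pl => pl.length) (rev := false)
        rw [hs] at hh
        simpa using hh.symm
      rw [hlen]
      push_cast
      ring
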